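-- pv_equiv track=rewrite | github.com/DexterBurns/FilterCam_2 | build/filtered_pointcloud_pkg/build/lib/filtered_pointcloud_pkg/threshold_node.py | RemoveNoiseFromCluster
-- ===== SOURCE A (Python) =====
-- def RemoveNoiseFromCluster(input_cluster):
--
--     valid_mask = [False] * len(input_cluster)
--     valid_mask_truth_count = 0
--
--     # This loop to create a mask of the valid values from the input cluster
--     for x in range(len(input_cluster)):
--         if input_cluster[x] < 0:
--             valid_mask[x] = False
--
--         else:
--             valid_mask[x] = True
--             valid_mask_truth_count = valid_mask_truth_count + 1
--
--     # Create an array the size of the truth count so we can return only the valid values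
--     valid_clusters = [0] * valid_mask_truth_count
--
--     count = 0
--     for x in range(len(valid_mask)):
--         if valid_mask[x] == True:
--             valid_clusters[count] = input_cluster[x]
--             count =  count + 1
--
--         else:
--             'Do nothing'
--
--     return valid_clusters, valid_mask, count
-- ===== SOURCE B (Python) =====
-- def RemoveNoiseFromCluster(input_cluster):
--     # Single fused pass: build mask, kept values and count together,
--     # instead of A's mask pass followed by a second rescan of the mask.
--     valid_clusters = []
--     valid_mask = []
--     count = 0
--     for x in input_cluster:
--         keep = not (x < 0)
--         valid_mask.append(keep)
--         if keep:
--             valid_clusters.append(x)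
--             count += 1
--     return valid_clusters, valid_mask, count
-- ===== Notes on version B (the rewrite author's own statement) =====
-- stated objective: simpler
-- what changed: Fuses A's two staged passes (preallocated mask built by index plus a second loop rescanning the mask to fill a preallocated output array via a write cursor) into one single pass that accumulates mask, kept values and count together, eliminating the mask-rescan pass and all preallocation/index mutation.
import Mathlib
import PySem

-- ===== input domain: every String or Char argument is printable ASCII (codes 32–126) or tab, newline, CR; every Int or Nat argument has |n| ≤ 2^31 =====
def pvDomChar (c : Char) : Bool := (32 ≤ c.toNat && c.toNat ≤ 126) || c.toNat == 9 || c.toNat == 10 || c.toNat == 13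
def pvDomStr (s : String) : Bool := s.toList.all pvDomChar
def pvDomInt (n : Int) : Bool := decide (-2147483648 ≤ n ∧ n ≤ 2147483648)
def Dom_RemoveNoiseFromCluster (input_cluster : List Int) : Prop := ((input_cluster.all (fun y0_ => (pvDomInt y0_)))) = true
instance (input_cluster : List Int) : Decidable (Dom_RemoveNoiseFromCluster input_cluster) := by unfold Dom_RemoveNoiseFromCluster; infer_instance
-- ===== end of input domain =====

-- B fuses A's two staged passes (mask-building pass, then a mask-rescan pass filling a
-- preallocated array) into one single pass accumulating mask, kept values and count together.
-- ===== PORT A =====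
-- Port of A: first loop builds the mask in place and counts truths; then a zero-filled
-- array of that size is filled by a second loop over the mask with a write cursor.
def pvLoop1 : List Int → Nat → List Bool → Int → List Bool × Int
  | [], _, mask, c => (mask, c)
  | v :: rest, i, mask, c =>
    if v < 0 then pvLoop1 rest (i+1) (mask.set i false) c
    else pvLoop1 rest (i+1) (mask.set i true) (c+1)

def pvLoop2 : List Bool → List Int → List Int → Int → List Int × Int
  | b :: bs, v :: vs, clusters, count =>
    if b = true then pvLoop2 bs vs (clusters.set count.toNat v) (count+1)
    else pvLoop2 bs vs clusters count
  | _, _, clusters, count => (clusters, count)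

def RemoveNoiseFromCluster (input_cluster : List Int) : List Int × List Bool × Int :=
  let r1 := pvLoop1 input_cluster 0 (List.replicate input_cluster.length false) 0
  let valid_mask := r1.1
  let valid_mask_truth_count := r1.2
  let valid_clusters := List.replicate valid_mask_truth_count.toNat (0 : Int)
  let r2 := pvLoop2 valid_mask input_cluster valid_clusters 0
  (r2.1, valid_mask, r2.2)

-- ===== PORT B =====
-- Port of B: one fold over the input, appending to the mask always and to the
-- kept-values list (with count bump) when the element is not negative.
def RemoveNoiseFromCluster_alt (input_cluster : List Int) : List Int × List Bool × Int :=
  input_cluster.foldl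
    (fun (s : List Int × List Bool × Int) x =>
      let keep := !decide (x < 0)
      let mask := s.2.1 ++ [keep]
      if keep then (s.1 ++ [x], mask, s.2.2 + 1) else (s.1, mask, s.2.2))
    ([], [], 0)

-- ===== PRECONDITION & SPEC =====
def Spec_RemoveNoiseFromCluster (input_cluster : List Int) (out : List Int × List Bool × Int) : Prop := out = RemoveNoiseFromCluster_alt input_cluster
instance (input_cluster : List Int) (out : List Int × List Bool × Int) : Decidable (Spec_RemoveNoiseFromCluster input_cluster out) := by unfold Spec_RemoveNoiseFromCluster; infer_instance

-- ===== CLAIM (what is proved, stated in full; the proofs are below) =====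
def Claim_equal_RemoveNoiseFromCluster : Prop := ∀ (input_cluster : List Int), Dom_RemoveNoiseFromCluster input_cluster → Spec_RemoveNoiseFromCluster input_cluster (RemoveNoiseFromCluster input_cluster)

-- ===== LEMMAS AND PROOFS =====
lemma pvLoop1_eq (l : List Int) : ∀ (p : List Bool) (c : Int),
    pvLoop1 l p.length (p ++ List.replicate l.length false) c
    = (p ++ l.map (fun x => !decide (x < 0)),
       c + ((l.filter (fun x => !decide (x < 0))).length : Int)) := by
  induction l with
  | nil => intro p c; simp [pvLoop1]
  | cons v rest ih =>
    intro p c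
    by_cases hv : v < 0
    · have := ih (p ++ [false]) c
      simp [pvLoop1, hv, List.replicate_succ] at *
      simpa using this
    · have := ih (p ++ [true]) (c + 1)
      simp [pvLoop1, hv, List.replicate_succ] at *
      simp [this]; ring

lemma pvLoop2_eq (l : List Int) : ∀ (done : List Int),
    pvLoop2 (l.map (fun x => !decide (x < 0))) l
      (done ++ List.replicate (l.filter (fun x => !decide (x < 0))).length (0 : Int))
      (done.length : Int)
    = (done ++ l.filter (fun x => !decide (x < 0)),
       (done.length : Int) + ((l.filter (fun x => !decide (x < 0))).length : Int)) := by
  induction l with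
  | nil => intro done; simp [pvLoop2]
  | cons v rest ih =>
    intro done
    by_cases hv : v < 0
    · have := ih done
      simp [pvLoop2, hv] at *
      simpa using this
    · have := ih (done ++ [v])
      simp [pvLoop2, hv, List.replicate_succ, Int.toNat_natCast] at *
      simp [this]; ring

lemma alt_fold_eq (l : List Int) : ∀ (cs : List Int) (ms : List Bool) (c : Int),
    l.foldl
      (fun (s : List Int × List Bool × Int) x =>
        let keep := !decide (x < 0)
        let mask := s.2.1 ++ [keep]
        if keep then (s.1 ++ [x], mask, s.2.2 + 1) else (s.1, mask, s.2.2))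
      (cs, ms, c)
    = (cs ++ l.filter (fun x => !decide (x < 0)),
       ms ++ l.map (fun x => !decide (x < 0)),
       c + ((l.filter (fun x => !decide (x < 0))).length : Int)) := by
  induction l with
  | nil => intro cs ms c; simp
  | cons v rest ih =>
    intro cs ms c
    simp only [List.foldl_cons]
    by_cases hv : v < 0
    · have := ih cs (ms ++ [false]) c
      simp only [hv] at this ⊢
      simp at this ⊢
      simp [this]
      have hf : List.filter (fun x => !decide (x < 0)) (v :: rest)
          = List.filter (fun x => !decide (x < 0)) rest :=
        List.filter_cons_of_neg (by simp [hv])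
      exact ⟨hf.symm, hv, by rw [hf]⟩
    · have := ih (cs ++ [v]) (ms ++ [true]) (c + 1)
      simp only [hv] at this ⊢
      simp at this ⊢
      simp [this, hv]
      omega

-- ===== VERDICT (by name: the statement is the Claim_ definition above) =====
theorem RemoveNoiseFromCluster_spec : Claim_equal_RemoveNoiseFromCluster := by
  intro l _
  unfold Spec_RemoveNoiseFromCluster RemoveNoiseFromCluster RemoveNoiseFromCluster_alt
  have h1 := pvLoop1_eq l [] 0
  simp only [List.length_nil, List.nil_append, Int.zero_add] at h1
  simp only [h1]
  have h2 := pvLoop2_eq l []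
  simp only [List.length_nil, List.nil_append, Int.natCast_zero, Int.zero_add] at h2
  have h3 := alt_fold_eq l [] [] 0
  simp only [List.nil_append, Int.zero_add] at h3
  simp only [h3]
  simp [h2, Int.toNat_natCast]
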